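/- GENERATED by tools/from_farm_form.py from prooffarm-gif/accepted/DGifSlurp.12/Proof.lean (a worked proof of the farm's unit `DGifSlurp.12`,
   accepted by the verdict) — do not edit. -/
import Gif.Spec.Units.DGifSlurp_12
import Gif.Spec.AllSegs

open X86 X86.User Asan ProgX.Base ProgX.Base.Spec Gif.Spec

set_option maxRecDepth 4000
set_option maxHeartbeats 4000000

namespace Gif.Spec.DGifSlurp_12

/-- **10A81FH … 10A82AH | 10A8EDH** (dgif_lib.c:1315-1323): the end of one round of the record loop. `RecordType ≠ 4`: back to the
head with the measure `rem R v.mem < m`; `RecordType = 4` (TERMINATE): the checked load of `gif.ImageCount`; 0: the checked store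
of `gif.Error = 69H`; both to the epilogue with the same heap and forest. -/
theorem sl12_seg (Lay : Layout) (hLay : Lay.hi = 0x1000000) (μ : Microarch) (hμ : UserX.MicroOK μ) (u₀ : State)
    (hcode : HasCodeNat Lay u₀ Gif.L.DGifSlurp.entry Gif.Code.code_DGifSlurp.nat Gif.L.DGifSlurp.size)
    (h_asan_load4_noabort : Asan.SmallCheck Lay μ ProgX.Base.WayInv (ProgX.Base.CodeOK u₀) [.rax, .rcx, .rdx] 4
      ProgX.Base.L.__asan_load4_noabort.entry)
    (h_asan_store4_noabort : Asan.SmallCheck Lay μ ProgX.Base.WayInv (ProgX.Base.CodeOK u₀) [.rax, .rcx, .rdx] 4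
      ProgX.Base.L.__asan_store4_noabort.entry)
    (H : Heap) (rest : List Obj) (frames : List (Nat × FrameLayout)) (F : Forest) (R : Rd) (Hc : Heap) (Fc : Forest) (m : Nat)
    (e : State) (ret : Word) (v : State)
    (hat : DGifSlurp.Rec Gif.L.DGifSlurp.at_10a81f H rest frames F R Hc Fc m u₀ e ret v) :
    ReachVia Lay μ ProgX.Base.WayInv v (fun w =>
      (∃ (m' : Nat), m' < m ∧ DGifSlurp.Head H rest frames F R Hc Fc m' u₀ e ret w) ∨
      DGifSlurp.Exit H rest frames F R u₀ e ret w) := by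
  -- THE PRELUDE: the entry assertion `Rec` = `At` + `Complete` + the measure
  obtain ⟨hA, hcomplete, hlt⟩ := hat
  obtain ⟨hcore, hregion, hgif, hpv, hinv, hok⟩ := hA
  have he := hcore.entry
  v_entry he
  obtain ⟨henv, hrdi, _⟩ := hcore.pre
  -- what the walker reads of a segment's entry state
  have w_rip := hcore.rip
  have c_rsp : v.reg .rsp = e.reg .rsp - 152 := hcore.rsp
  have c_rbp : v.reg .rbp = e.reg .rdi := hcore.rbp
  have w_kept : RegsKept [.rsp] v v := RegsKept.refl _ _
  have w_eq : Mem.EqOn ProgX.Base.L.textLo ProgX.Base.L.textHi u₀.mem v.mem := ProgX.Base.conv_code_eqOn hcore.code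
  have hdf := (show abiInv _ from hcore.abi).1
  have hmx := (show abiInv _ from hcore.abi).2
  have hsse := ProgX.Base.sseOK_of_abiInv hcore.abi
  -- the slots and the footprint that `Core` at the exit states again
  have k_r15 : v.mem.readLE (e.reg .rsp - 8) 8 = (e.reg .r15).toNat := hcore.slot_r15
  have k_r14 : v.mem.readLE (e.reg .rsp - 16) 8 = (e.reg .r14).toNat := hcore.slot_r14
  have k_r13 : v.mem.readLE (e.reg .rsp - 24) 8 = (e.reg .r13).toNat := hcore.slot_r13
  have k_r12 : v.mem.readLE (e.reg .rsp - 32) 8 = (e.reg .r12).toNat := hcore.slot_r12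
  have k_rbp : v.mem.readLE (e.reg .rsp - 40) 8 = (e.reg .rbp).toNat := hcore.slot_rbp
  have k_rbx : v.mem.readLE (e.reg .rsp - 48) 8 = (e.reg .rbx).toNat := hcore.slot_rbx
  have k_ra : UInt64.ofNat (v.mem.readLE (e.reg .rsp) 8) = ret := hcore.slot_ra
  have hsame : Mem.SameExcept
    [⟨(e.reg .rsp).toNat - 848, (e.reg .rsp).toNat⟩,
     shadowSpan ((e.reg .rsp).toNat - 152) ((e.reg .rsp).toNat - 56),
     ⟨0x800000, 0x1000020⟩,
     ⟨R.cur, R.cur + 8⟩] e.mem v.mem := hcore.same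
  -- where the cursor and gif are, as numbers
  have hcur := henv.ctx.cursor_range henv.heap.inv.shadow
  have hbase : Hc.base = 0x800000 := by
    rw [hregion.1]
    exact henv.heap.base
  have hgin := hok.owns.inside hinv.heap (o := (Fc.gif, 120)) List.mem_cons_self
  simp only at hgin
  rw [hbase, hgif] at hgin
  -- gif is live under the body's frames: what both check goals ask
  have hgl : LiveIn (Hc.liveObjs ++ rest) (DGifSlurp.framesIn frames e) F.gif 120 := by
    rw [← hgif]
    exact hok.gif_live.liveIn rest _ (Nat.le_refl _) (Nat.le_refl _)
  -- THE WALK, the three arms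
  u_walk hcode [hμ.vendor] until [Gif.L.DGifSlurp.at_10a82a, Gif.L.DGifSlurp.at_10a8ed]
    span [ProgX.Base.L.textLo, ProgX.Base.L.textHi] side (v_side)
  case check_10a9d1 =>
    -- dgif_lib.c:1318 the load of `gif.ImageCount`: 4 bytes inside gif
    have hun : ShadowUntouched v.mem s_10a9d1.mem := by v_untouched
    exact hgl.accSmall hinv.shadow hun _ 4 (by decide) (by u_omega) (by u_omega)
  case check_10a9eb =>
    -- dgif_lib.c:1319 the store of `gif.Error`: 4 bytes inside gif
    have hun : ShadowUntouched v.mem s_10a9eb.mem := by v_untouched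
    exact hgl.accSmall hinv.shadow hun _ 4 (by decide) (by u_omega) (by u_omega)
  · -- 0x10a8ed FROM 0x10a9f7: `ImageCount = 0`, `gif.Error = D_GIF_ERR_NO_IMAG_DSCR` stored
    -- the two stores since `v`: the check call's return address (stack), then `gif.Error`
    obtain ⟨hinvA, hokA, hremA⟩ := store_stack hinv hok ⟨hcur.1, hcur.2.1⟩ (e.reg .rsp - 160) 8 1092080
      (by u_omega) (by u_omega)
    obtain ⟨hinvB, hokB, hremB⟩ := store_gif hinvA hokA ⟨hcur.1, hcur.2.1⟩ hbase (e.reg .rdi + 96) 4 105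
      (Or.inr (Or.inr (by
        rw [hgif]
        u_omega)))
    rw [← w_mem] at hinvB hokB hremB
    have hremF : rem R s_10a9f7.mem = rem R v.mem := hremB.trans hremA
    have hcore1 : DGifSlurp.Core Gif.L.DGifSlurp.at_10a8ed H rest frames F R u₀ e ret s_10a9f7 := {
      entry := hcore.entry
      pre := hcore.pre
      rip := w_rip
      rsp := w_rsp
      rbp := (w_kept.get .rbp rfl).trans hcore.rbp
      r14 := (w_kept.get .r14 rfl).trans hcore.r14
      slot_r15 := by
        rw [w_mem]
        u_frame k_r15
      slot_r14 := by
        rw [w_mem]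
        u_frame k_r14
      slot_r13 := by
        rw [w_mem]
        u_frame k_r13
      slot_r12 := by
        rw [w_mem]
        u_frame k_r12
      slot_rbp := by
        rw [w_mem]
        u_frame k_rbp
      slot_rbx := by
        rw [w_mem]
        u_frame k_rbx
      slot_ra := by
        rw [w_mem]
        u_frame k_ra
      rem := by
        rw [hremF]
        exact hcore.rem
      same := by
        rw [w_mem]
        u_same
      code := ProgX.Base.conv_code_in w_eq
      abi := by
        refine ProgX.Base.abiInv_of ?_ ?_
        · rw [w_flags]
          exact w_df_10a9eb
        · rw [w_mxcsr]
          exact hmx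
    }
    refine ReachVia.done (Or.inr ⟨Hc, Fc, ?_⟩)
    exact {
      at_ := {
        core := hcore1
        region := hregion
        gif := hgif
        pv := hpv
        inv := hinvB
        ok := hokB
      }
      complete := hcomplete
    }
  · -- 0x10a8ed FROM 0x10a9e2: `ImageCount ≠ 0`, `ebx = GIF_OK`
    -- the one store since `v`: the check call's return address (stack)
    obtain ⟨hinvA, hokA, hremA⟩ := store_stack hinv hok ⟨hcur.1, hcur.2.1⟩ (e.reg .rsp - 160) 8 1092054
      (by u_omega) (by u_omega)
    rw [← w_mem] at hinvA hokA hremA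
    have hcore1 : DGifSlurp.Core Gif.L.DGifSlurp.at_10a8ed H rest frames F R u₀ e ret s_10a9e2 := {
      entry := hcore.entry
      pre := hcore.pre
      rip := w_rip
      rsp := w_rsp
      rbp := (w_kept.get .rbp rfl).trans hcore.rbp
      r14 := (w_kept.get .r14 rfl).trans hcore.r14
      slot_r15 := by
        rw [w_mem]
        u_frame k_r15
      slot_r14 := by
        rw [w_mem]
        u_frame k_r14
      slot_r13 := by
        rw [w_mem]
        u_frame k_r13
      slot_r12 := by
        rw [w_mem]
        u_frame k_r12
      slot_rbp := by
        rw [w_mem]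
        u_frame k_rbp
      slot_rbx := by
        rw [w_mem]
        u_frame k_rbx
      slot_ra := by
        rw [w_mem]
        u_frame k_ra
      rem := by
        rw [hremA]
        exact hcore.rem
      same := by
        rw [w_mem]
        u_same
      code := ProgX.Base.conv_code_in w_eq
      abi := by
        refine ProgX.Base.abiInv_of ?_ ?_
        · rw [w_flags]
          simp only [X86.User.df_setStatus]
          exact w_df_10a9d1
        · rw [w_mxcsr]
          exact hmx
    }
    refine ReachVia.done (Or.inr ⟨Hc, Fc, ?_⟩)
    exact {
      at_ := {
        core := hcore1
        region := hregion
        gif := hgif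
        pv := hpv
        inv := hinvA
        ok := hokA
      }
      complete := hcomplete
    }
  · -- 0x10a82a FROM 0x10a824: `RecordType ≠ TERMINATE_RECORD_TYPE`: back to the head of the record loop; nothing was stored
    have hcore1 : DGifSlurp.Core Gif.L.DGifSlurp.at_10a82a H rest frames F R u₀ e ret s_10a824 := {
      entry := hcore.entry
      pre := hcore.pre
      rip := w_rip
      rsp := w_rsp
      rbp := (w_kept.get .rbp rfl).trans hcore.rbp
      r14 := (w_kept.get .r14 rfl).trans hcore.r14
      slot_r15 := by
        rw [w_mem]
        exact k_r15
      slot_r14 := by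
        rw [w_mem]
        exact k_r14
      slot_r13 := by
        rw [w_mem]
        exact k_r13
      slot_r12 := by
        rw [w_mem]
        exact k_r12
      slot_rbp := by
        rw [w_mem]
        exact k_rbp
      slot_rbx := by
        rw [w_mem]
        exact k_rbx
      slot_ra := by
        rw [w_mem]
        exact k_ra
      rem := by
        rw [w_mem]
        exact hcore.rem
      same := by
        rw [w_mem]
        exact hcore.same
      code := ProgX.Base.conv_code_in w_eq
      abi := by
        refine ProgX.Base.abiInv_of ?_ ?_
        · rw [w_flags]
          simp only [X86.User.df_setStatus]
          exact hdf
        · rw [w_mxcsr]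
          exact hmx
    }
    -- the measure of the next round: what is left now, less than `m`
    refine ReachVia.done (Or.inl ⟨rem R v.mem, hlt, ?_⟩)
    exact {
      at_ := {
        core := hcore1
        region := hregion
        gif := hgif
        pv := hpv
        inv := by
          rw [w_mem]
          exact hinv
        ok := by
          rw [w_mem]
          exact hok
      }
      complete := hcomplete
      meas := by
        rw [w_mem]
    }

end Gif.Spec.DGifSlurp_12

theorem Gif.Spec.Proved.DGifSlurp_12_ok : Gif.Spec.DGifSlurp_12.Statement := by
  unfold Gif.Spec.DGifSlurp_12.Statement
  intro Lay hLay μ hμ u₀ hcode h_load4 h_store4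
  intro H rest frames F R Hc Fc m e ret v hat
  exact Gif.Spec.DGifSlurp_12.sl12_seg Lay hLay μ hμ u₀ hcode h_load4 h_store4 H rest frames F R Hc Fc m e ret v hat
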